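-- pv_equiv track=rewrite | github.com/9MNickHazard/Eldgard | character_and_monsters.py | get_modifier_value
-- ===== SOURCE A (Python) =====
-- def get_modifier_value(stat):
--     modifiers = {
--         range(1, 2): -5,
--         range(2, 4): -4,
--         range(4, 6): -3,
--         range(6, 8): -2,
--         range(8, 10): -1,
--         range(10, 12): 0,
--         range(12, 14): 1,
--         range(14, 16): 2,
--         range(16, 18): 3,
--         range(18, 20): 4,
--         range(20, 22): 5,
--         range(22, 24): 6,
--         range(24, 26): 7,
--         range(26, 28): 8,
--         range(28, 30): 9,
--         range(30, 31): 10
--         }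
--     for stat_range, modifier in modifiers.items():
--         if stat in stat_range:
--             return f"+{modifier}" if modifier > 0 else str(modifier)
-- ===== SOURCE B (Python) =====
-- def get_modifier_value(stat):
--     if stat not in range(1, 31):
--         return None
--     modifier = (int(stat) - 10) // 2
--     return f"+{modifier}" if modifier > 0 else str(modifier)
-- ===== Notes on version B (the rewrite author's own statement) =====
-- stated objective: simpler
-- what changed: Replaces A's sixteen-entry range table and its search loop with a single closed-form arithmetic expression behind one range-membership guard.
import Mathlib
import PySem

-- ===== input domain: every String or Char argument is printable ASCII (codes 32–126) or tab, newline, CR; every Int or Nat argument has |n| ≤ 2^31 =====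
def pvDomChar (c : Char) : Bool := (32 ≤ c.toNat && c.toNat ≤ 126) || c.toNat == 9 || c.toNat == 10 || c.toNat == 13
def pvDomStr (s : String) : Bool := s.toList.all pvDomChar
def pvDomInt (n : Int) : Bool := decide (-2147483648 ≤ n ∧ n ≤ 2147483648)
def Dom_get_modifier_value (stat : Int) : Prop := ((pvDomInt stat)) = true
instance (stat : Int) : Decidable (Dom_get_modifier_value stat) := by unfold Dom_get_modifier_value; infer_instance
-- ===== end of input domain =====

-- B replaces A's 16-entry range table and search loop with the closed form (stat-10)//2; objective: simpler.
-- ===== PORT A =====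
-- the loop over modifiers.items(): first matching range wins, fall-through returns None
def pvScanA : List ((Int × Int) × Int) → Int → Option String
  | [], _ => none
  | ((lo, hi), m) :: rest, stat =>
    if lo ≤ stat ∧ stat < hi then
      (if m > 0 then some ("+" ++ PySem.Int.toStr m) else some (PySem.Int.toStr m))
    else pvScanA rest stat

def get_modifier_value (stat : Int) : Option String :=
  pvScanA [((1,2),-5), ((2,4),-4), ((4,6),-3), ((6,8),-2), ((8,10),-1),
           ((10,12),0), ((12,14),1), ((14,16),2), ((16,18),3), ((18,20),4),
           ((20,22),5), ((22,24),6), ((24,26),7), ((26,28),8), ((28,30),9),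
           ((30,31),10)] stat

-- ===== PORT B =====
def get_modifier_value_alt (stat : Int) : Option String :=
  if 1 ≤ stat ∧ stat < 31 then
    let m := PySem.Int.floordiv (stat - 10) 2
    if m > 0 then some ("+" ++ PySem.Int.toStr m) else some (PySem.Int.toStr m)
  else none

-- ===== PRECONDITION & SPEC =====
def Spec_get_modifier_value (stat : Int) (out : Option String) : Prop := out = get_modifier_value_alt stat
instance (stat : Int) (out : Option String) : Decidable (Spec_get_modifier_value stat out) := by unfold Spec_get_modifier_value; infer_instance

-- ===== CLAIM (what is proved, stated in full; the proofs are below) =====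
def Claim_equal_get_modifier_value : Prop := ∀ (stat : Int), Dom_get_modifier_value stat → Spec_get_modifier_value stat (get_modifier_value stat)

-- ===== LEMMAS AND PROOFS =====
set_option maxHeartbeats 1000000 in

-- ===== VERDICT (by name: the statement is the Claim_ definition above) =====
theorem get_modifier_value_spec : Claim_equal_get_modifier_value := by
  intro stat _
  unfold Spec_get_modifier_value
  by_cases h : 1 ≤ stat ∧ stat < 31
  · obtain ⟨h1, h2⟩ := h
    interval_cases stat <;> rfl
  · have hb : get_modifier_value_alt stat = none := by
      unfold get_modifier_value_alt; rw [if_neg h]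
    rw [hb]
    unfold get_modifier_value
    rw [pvScanA, if_neg (show ¬((1:Int) ≤ stat ∧ stat < 2) by omega)]
    rw [pvScanA, if_neg (show ¬((2:Int) ≤ stat ∧ stat < 4) by omega)]
    rw [pvScanA, if_neg (show ¬((4:Int) ≤ stat ∧ stat < 6) by omega)]
    rw [pvScanA, if_neg (show ¬((6:Int) ≤ stat ∧ stat < 8) by omega)]
    rw [pvScanA, if_neg (show ¬((8:Int) ≤ stat ∧ stat < 10) by omega)]
    rw [pvScanA, if_neg (show ¬((10:Int) ≤ stat ∧ stat < 12) by omega)]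
    rw [pvScanA, if_neg (show ¬((12:Int) ≤ stat ∧ stat < 14) by omega)]
    rw [pvScanA, if_neg (show ¬((14:Int) ≤ stat ∧ stat < 16) by omega)]
    rw [pvScanA, if_neg (show ¬((16:Int) ≤ stat ∧ stat < 18) by omega)]
    rw [pvScanA, if_neg (show ¬((18:Int) ≤ stat ∧ stat < 20) by omega)]
    rw [pvScanA, if_neg (show ¬((20:Int) ≤ stat ∧ stat < 22) by omega)]
    rw [pvScanA, if_neg (show ¬((22:Int) ≤ stat ∧ stat < 24) by omega)]
    rw [pvScanA, if_neg (show ¬((24:Int) ≤ stat ∧ stat < 26) by omega)]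
    rw [pvScanA, if_neg (show ¬((26:Int) ≤ stat ∧ stat < 28) by omega)]
    rw [pvScanA, if_neg (show ¬((28:Int) ≤ stat ∧ stat < 30) by omega)]
    rw [pvScanA, if_neg (show ¬((30:Int) ≤ stat ∧ stat < 31) by omega)]
    rw [pvScanA]
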